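-- pv_equiv track=rewrite | github.com/AntonEryomin/yandex_algo_training | Тренировки по алгоритмам 1.0/Домашнее задание 4/Task B.py | words_counter
-- ===== SOURCE A (Python) =====
-- from typing import List
--
-- def words_counter(words: List[str]) -> List[int]:
--     words_statistics = []
--     words_counter_dict = {}
--
--     for word in words:
--         if len(word) > 0:
--             if word not in words_counter_dict:
--                 words_statistics.append(0)
--                 words_counter_dict[word] = 1
--             else:
--                 words_statistics.append(words_counter_dict[word])
--                 words_counter_dict[word] += 1
--     return " ".join([str(_) for _ in words_statistics])
-- ===== SOURCE B (Python) =====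
-- def words_counter(words):
--     # Staged algorithm: keep the nonempty words, preallocate a zero array,
--     # then for each DISTINCT word make one stamping pass that writes the
--     # occurrence ranks 0,1,2,... at that word's positions; finally join.
--     ws = [w for w in words if w]
--     out = [0] * len(ws)
--     for w in dict.fromkeys(ws):
--         k = 0
--         for i, x in enumerate(ws):
--             if x == w:
--                 out[i] = k
--                 k += 1
--     return " ".join(str(v) for v in out)
-- ===== Notes on version B (the rewrite author's own statement) =====
-- stated objective: alternative
-- what changed: Replaced A's single pass with a running-count dict by a staged algorithm: filter out empty words, preallocate a zero array, then for each distinct word make one stamping pass that writes occurrence ranks 0,1,2,... at that word's positions, and join at the end.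
import Mathlib
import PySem

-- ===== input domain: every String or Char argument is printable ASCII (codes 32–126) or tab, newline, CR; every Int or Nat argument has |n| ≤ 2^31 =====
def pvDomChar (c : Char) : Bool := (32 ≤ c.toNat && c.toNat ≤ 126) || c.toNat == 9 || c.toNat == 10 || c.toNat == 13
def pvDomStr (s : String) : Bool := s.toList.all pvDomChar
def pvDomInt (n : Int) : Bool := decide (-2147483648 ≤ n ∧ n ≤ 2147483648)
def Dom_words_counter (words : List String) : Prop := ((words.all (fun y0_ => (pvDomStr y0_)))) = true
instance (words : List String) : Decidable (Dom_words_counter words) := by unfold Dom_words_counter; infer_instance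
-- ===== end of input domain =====

-- B replaces A's one-pass running-count dict by staged stamping passes: filter out empty
-- words, preallocate a zero array, and for each distinct word write the occurrence ranks
-- 0,1,2,... at that word's positions (objective: alternative; not claimed faster).

-- ===== PORT A =====
-- the for-loop of A over (words_statistics, words_counter_dict)
def wcLoop (ws : List String) (stats : List Int) (d : PySem.Dict String Int) : List Int :=
  match ws with
  | [] => stats
  | word :: rest =>
    if 0 < PySem.Str.len word then
      if d.contains word = false then
        wcLoop rest (stats ++ [0]) (d.insert word 1)
      else
        wcLoop rest (stats ++ [d.getD word 0]) (d.insert word (d.getD word 0 + 1))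
    else
      wcLoop rest stats d

def words_counter (words : List String) : String :=
  PySem.Str.join " " ((wcLoop words [] PySem.Dict.empty).map PySem.Int.toStr)

-- ===== PORT B =====
-- ws = [w for w in words if w]; out = [0]*len(ws);
-- for w in dict.fromkeys(ws): k = 0; for i, x in enumerate(ws): if x == w: out[i] = k; k += 1
-- return " ".join(str(v) for v in out)
-- (enumerate indices are ≥ 0, so 'out[i] = k' is List.set at q.1.toNat — exact here)
def words_counter_alt (words : List String) : String :=
  let ws := words.filter (fun w => decide (w ≠ ""))
  let out0 := PySem.List.pyRepeat [(0 : Int)] (ws.length : Int)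
  let out := (PySem.List.dedup ws).foldl
    (fun out w =>
      ((PySem.List.enumerate ws).foldl
        (fun st q => if q.2 = w then (st.1.set q.1.toNat st.2, st.2 + 1) else st)
        (out, (0 : Int))).1)
    out0
  PySem.Str.join " " (out.map PySem.Int.toStr)

-- ===== PRECONDITION & SPEC =====
def Spec_words_counter (words : List String) (out : String) : Prop := out = words_counter_alt words
instance (words : List String) (out : String) : Decidable (Spec_words_counter words out) := by unfold Spec_words_counter; infer_instance

-- ===== CLAIM (what is proved, stated in full; the proofs are below) =====
def Claim_equal_words_counter : Prop := ∀ (words : List String), Dom_words_counter words → Spec_words_counter words (words_counter words)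

-- ===== LEMMAS AND PROOFS =====

-- the list of prior-occurrence counts of the nonempty words of ws, given an already-seen prefix p
def priorCounts (p ws : List String) : List Int :=
  match ws with
  | [] => []
  | w :: rest =>
    if w = "" then priorCounts (p ++ [w]) rest
    else (p.count w : Int) :: priorCounts (p ++ [w]) rest

-- the same counts on an already-filtered (empty-free) list
def pc (p ws : List String) : List Int :=
  match ws with
  | [] => []
  | w :: rest => (p.count w : Int) :: pc (p ++ [w]) rest

-- the effect of B's inner stamping pass, written structurally
def stampList (out : List Int) (n : Nat) (ws : List String) (w : String) (k : Int) : List Int :=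
  match ws with
  | [] => out
  | x :: rest =>
    if x = w then stampList (out.set n k) (n + 1) rest w (k + 1)
    else stampList out (n + 1) rest w k

lemma count_append_self (p : List String) (w : String) : (p ++ [w]).count w = p.count w + 1 := by
  simp

lemma count_append_other (p : List String) (w w' : String) (h : w' ≠ w) :
    (p ++ [w]).count w' = p.count w' := by
  simp [List.count_append, Ne.symm h]

-- A's dict invariant: d.get? w holds the number of occurrences of w in the processed prefix p
lemma wcLoop_spec : ∀ (ws p : List String) (stats : List Int) (d : PySem.Dict String Int),
    (∀ w : String, w ≠ "" → d.get? w = if p.count w = 0 then none else some (p.count w : Int)) →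
    wcLoop ws stats d = stats ++ priorCounts p ws := by
  intro ws
  induction ws with
  | nil => intro p stats d _; simp [wcLoop, priorCounts]
  | cons w rest ih =>
    intro p stats d hd
    by_cases hw : w = ""
    · have hlen : ¬ 0 < PySem.Str.len w := by subst hw; simp [PySem.Str.len_eq]
      rw [wcLoop, if_neg hlen, priorCounts, if_pos hw]
      apply ih
      intro w' hw'
      rw [count_append_other p w w' (fun hh => hw' (hw ▸ hh))]
      exact hd w' hw'
    · have hlen : 0 < PySem.Str.len w := by
        rw [PySem.Str.len_eq]
        have hne : w.toList ≠ [] := fun h => hw (String.toList_eq_nil_iff.mp h)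
        have := List.length_pos_of_ne_nil hne
        omega
      have hget := hd w hw
      by_cases hc : p.count w = 0
      · rw [if_pos hc] at hget
        have hcont : d.contains w = false := by
          rw [PySem.Dict.contains_eq_isSome_get?, hget]; rfl
        rw [wcLoop, if_pos hlen, if_pos hcont, priorCounts, if_neg hw, hc]
        rw [ih (p ++ [w]) _ _ ?_]
        · simp
        · intro w' hw'
          rw [PySem.Dict.get?_insert]
          by_cases h : w' = w
          · subst h
            rw [if_pos rfl, count_append_self, hc, if_neg (by omega)]
            norm_num
          · rw [if_neg h, count_append_other p w w' h]
            exact hd w' hw'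
      · rw [if_neg hc] at hget
        have hcont : ¬ d.contains w = false := by
          rw [PySem.Dict.contains_eq_isSome_get?, hget]; simp
        have hgetD : d.getD w 0 = (p.count w : Int) := by
          rw [PySem.Dict.getD_eq_get?_getD, hget]; rfl
        rw [wcLoop, if_pos hlen, if_neg hcont, priorCounts, if_neg hw, hgetD]
        rw [ih (p ++ [w]) _ _ ?_]
        · simp
        · intro w' hw'
          rw [PySem.Dict.get?_insert]
          by_cases h : w' = w
          · subst h
            rw [if_pos rfl, count_append_self, if_neg (by omega)]
            push_cast
            ring_nf
          · rw [if_neg h, count_append_other p w w' h]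
            exact hd w' hw'

-- priorCounts over the raw list equals pc over the filtered list (empties never match a count)
lemma priorCounts_eq_pc : ∀ (ws p p' : List String),
    (∀ w : String, w ≠ "" → p.count w = p'.count w) →
    priorCounts p ws = pc p' (ws.filter (fun w => decide (w ≠ ""))) := by
  intro ws
  induction ws with
  | nil => intro p p' _; simp [priorCounts, pc]
  | cons w rest ih =>
    intro p p' hp
    by_cases hw : w = ""
    · rw [priorCounts, if_pos hw]
      have : (w :: rest).filter (fun w => decide (w ≠ "")) = rest.filter (fun w => decide (w ≠ "")) := by
        simp [hw]
      rw [this]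
      apply ih
      intro w' hw'
      rw [count_append_other p w w' (fun hh => hw' (hw ▸ hh))]
      exact hp w' hw'
    · rw [priorCounts, if_neg hw]
      have : (w :: rest).filter (fun w => decide (w ≠ "")) = w :: rest.filter (fun w => decide (w ≠ "")) := by
        simp [hw]
      rw [this, pc, hp w hw]
      congr 1
      apply ih
      intro w' hw'
      by_cases h : w' = w
      · subst h; rw [count_append_self, count_append_self, hp w' hw']
      · rw [count_append_other p w w' h, count_append_other p' w w' h]
        exact hp w' hw'

lemma pc_getElem? : ∀ (ws p : List String) (i : Nat),
    (pc p ws)[i]? = (ws[i]?).map (fun v => ((p ++ ws.take i).count v : Int)) := by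
  intro ws
  induction ws with
  | nil => intro p i; simp [pc]
  | cons w rest ih =>
    intro p i
    cases i with
    | zero => simp [pc]
    | succ j =>
      rw [pc]
      simp only [List.getElem?_cons_succ, List.take_succ_cons]
      rw [ih (p ++ [w]) j]
      cases rest[j]? with
      | none => rfl
      | some v => simp

lemma stampList_length : ∀ (ws : List String) (out : List Int) (n : Nat) (w : String) (k : Int),
    (stampList out n ws w k).length = out.length := by
  intro ws
  induction ws with
  | nil => intro out n w k; rfl
  | cons x rest ih =>
    intro out n w k
    rw [stampList]
    by_cases h : x = w
    · rw [if_pos h, ih]; simp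
    · rw [if_neg h, ih]

lemma stampList_getElem? : ∀ (ws : List String) (out : List Int) (n : Nat) (w : String) (k : Int)
    (i : Nat), n + ws.length ≤ out.length →
    (stampList out n ws w k)[i]? =
      if n ≤ i ∧ ws[i - n]? = some w then some (k + ((ws.take (i - n)).count w : Int))
      else out[i]? := by
  intro ws
  induction ws with
  | nil =>
    intro out n w k i _
    rw [stampList, if_neg]
    rintro ⟨_, h⟩; simp at h
  | cons x rest ih =>
    intro out n w k i hlen
    have hn : n < out.length := by simp at hlen; omega
    rw [stampList]
    by_cases hx : x = w
    · rw [if_pos hx]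
      rw [ih (out.set n k) (n + 1) w (k + 1) i (by simp at hlen ⊢; omega)]
      by_cases hni : n + 1 ≤ i
      · have hsub : i - n = (i - (n + 1)) + 1 := by omega
        by_cases hr : rest[i - (n + 1)]? = some w
        · rw [if_pos ⟨hni, hr⟩, if_pos ⟨by omega, by rw [hsub]; simpa using hr⟩]
          rw [hsub]
          simp only [List.take_succ_cons, List.count_cons]
          rw [if_pos (by simp [hx])]
          congr 1
          push_cast
          ring
        · rw [if_neg (by rintro ⟨_, h⟩; exact hr h), if_neg ?_]
          · rw [List.getElem?_set_ne (by omega)]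
          · rintro ⟨_, h⟩
            rw [hsub] at h
            simp only [List.getElem?_cons_succ] at h
            exact hr h
      · rw [if_neg (fun h => hni h.1)]
        by_cases hi : i = n
        · subst hi
          rw [if_pos ⟨le_refl _, by simp [hx]⟩]
          simp only [Nat.sub_self, List.take_zero, List.count_nil]
          rw [List.getElem?_set_self hn]
          simp
        · rw [if_neg ?_, List.getElem?_set_ne (fun h => hi h.symm)]
          rintro ⟨h1, _⟩
          omega
    · rw [if_neg hx]
      rw [ih out (n + 1) w k i (by simp at hlen ⊢; omega)]
      by_cases hni : n + 1 ≤ i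
      · have hsub : i - n = (i - (n + 1)) + 1 := by omega
        by_cases hr : rest[i - (n + 1)]? = some w
        · rw [if_pos ⟨hni, hr⟩, if_pos ⟨by omega, by rw [hsub]; simpa using hr⟩]
          rw [hsub]
          simp only [List.take_succ_cons, List.count_cons]
          rw [if_neg (by simp [hx])]
          simp
        · rw [if_neg (by rintro ⟨_, h⟩; exact hr h), if_neg ?_]
          rintro ⟨_, h⟩
          rw [hsub] at h
          simp only [List.getElem?_cons_succ] at h
          exact hr h
      · rw [if_neg (fun h => hni h.1), if_neg ?_]
        rintro ⟨h1, h2⟩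
        have hi : i = n := by omega
        subst hi
        simp only [Nat.sub_self, List.getElem?_cons_zero, Option.some.injEq] at h2
        exact hx h2

-- B's inner enumerate-fold IS stampList (and its counter ends at the occurrence count)
lemma enumFold_eq_stampList : ∀ (ws : List String) (n : Nat) (out : List Int) (k : Int) (w : String),
    (PySem.List.enumerate ws (n : Int)).foldl
      (fun st q => if q.2 = w then (st.1.set q.1.toNat st.2, st.2 + 1) else st) (out, k)
    = (stampList out n ws w k, k + (ws.count w : Int)) := by
  intro ws
  induction ws with
  | nil => intro n out k w; simp [PySem.List.enumerate_nil, stampList]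
  | cons x rest ih =>
    intro n out k w
    rw [PySem.List.enumerate_cons, List.foldl_cons, stampList]
    by_cases hx : x = w
    · rw [if_pos hx]
      simp only [Int.toNat_natCast]
      have : ((n : Int) + 1) = ((n + 1 : Nat) : Int) := by push_cast; ring
      rw [this, ih, if_pos hx]
      simp only [List.count_cons]
      rw [if_pos (by simp [hx])]
      congr 1
      push_cast
      ring
    · rw [if_neg hx]
      have : ((n : Int) + 1) = ((n + 1 : Nat) : Int) := by push_cast; ring
      rw [this, ih, if_neg hx]
      simp only [List.count_cons]
      rw [if_neg (by simp [hx])]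
      simp

-- B's outer fold over the distinct words, elementwise
lemma outerFold_getElem?_none : ∀ (ds ws : List String) (out : List Int) (i : Nat),
    out.length = ws.length → ws[i]? = none →
    ((ds.foldl (fun o w => stampList o 0 ws w 0) out))[i]? = out[i]? := by
  intro ds
  induction ds with
  | nil => intro ws out i _ _; rfl
  | cons w rest ih =>
    intro ws out i hlen hnone
    rw [List.foldl_cons, ih ws _ i (by rw [stampList_length]; exact hlen) hnone]
    rw [stampList_getElem? ws out 0 w 0 i (by omega)]
    rw [if_neg (by rintro ⟨_, h⟩; rw [Nat.sub_zero, hnone] at h; cases h)]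

lemma outerFold_getElem?_some : ∀ (ds ws : List String) (out : List Int) (i : Nat) (v : String),
    out.length = ws.length → ws[i]? = some v →
    ((ds.foldl (fun o w => stampList o 0 ws w 0) out))[i]? =
      if v ∈ ds then some (((ws.take i).count v : Int)) else out[i]? := by
  intro ds
  induction ds with
  | nil => intro ws out i v _ _; simp
  | cons w rest ih =>
    intro ws out i v hlen hv
    rw [List.foldl_cons, ih ws _ i v (by rw [stampList_length]; exact hlen) hv]
    by_cases hrest : v ∈ rest
    · rw [if_pos hrest, if_pos (List.mem_cons_of_mem _ hrest)]
    · rw [if_neg hrest]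
      rw [stampList_getElem? ws out 0 w 0 i (by omega)]
      by_cases hvw : v = w
      · subst hvw
        rw [if_pos ⟨Nat.zero_le i, by simpa using hv⟩, if_pos List.mem_cons_self]
        simp
      · rw [if_neg ?_, if_neg ?_]
        · simp [hvw, hrest]
        · rintro ⟨_, h⟩
          rw [Nat.sub_zero, hv] at h
          exact hvw (Option.some.inj h)

-- B's whole array equals pc [] ws for the filtered list ws
lemma alt_array_eq_pc (ws : List String) :
    (PySem.List.dedup ws).foldl (fun o w => stampList o 0 ws w 0)
      (PySem.List.pyRepeat [(0 : Int)] (ws.length : Int)) = pc [] ws := by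
  have hrep : PySem.List.pyRepeat [(0 : Int)] (ws.length : Int) = List.replicate ws.length 0 := by
    rw [PySem.List.pyRepeat_singleton]; simp
  apply List.ext_getElem?
  intro i
  rw [pc_getElem?]
  by_cases hi : i < ws.length
  · have hv : ws[i]? = some ws[i] := List.getElem?_eq_getElem hi
    rw [outerFold_getElem?_some _ ws _ i ws[i] (by rw [hrep]; simp) hv]
    rw [if_pos (by rw [PySem.List.mem_dedup]; exact List.getElem_mem hi)]
    rw [hv]
    simp
  · have hv : ws[i]? = none := List.getElem?_eq_none (by omega)
    rw [outerFold_getElem?_none _ ws _ i (by rw [hrep]; simp) hv, hv, hrep]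
    simp [hi]

-- ===== VERDICT (by name: the statement is the Claim_ definition above) =====
theorem words_counter_spec : Claim_equal_words_counter := by
  have hfold : ∀ (out : List Int) (w : String) (ws : List String),
      ((PySem.List.enumerate ws).foldl
        (fun st q => if q.2 = w then (st.1.set q.1.toNat st.2, st.2 + 1) else st)
        (out, (0 : Int))).1 = stampList out 0 ws w 0 := by
    intro out w ws
    have h := enumFold_eq_stampList ws 0 out 0 w
    rw [Nat.cast_zero] at h
    rw [h]
  intro words _
  unfold Spec_words_counter words_counter words_counter_alt
  rw [wcLoop_spec words [] [] PySem.Dict.empty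
      (by intro w _; simp [PySem.Dict.get?_empty])]
  rw [List.nil_append, priorCounts_eq_pc words [] [] (fun _ _ => rfl)]
  show _ = PySem.Str.join " "
    (((PySem.List.dedup (words.filter (fun w => decide (w ≠ "")))).foldl
      (fun out w =>
        ((PySem.List.enumerate (words.filter (fun w => decide (w ≠ "")))).foldl
          (fun st q => if q.2 = w then (st.1.set q.1.toNat st.2, st.2 + 1) else st)
          (out, (0 : Int))).1)
      (PySem.List.pyRepeat [(0 : Int)] ((words.filter (fun w => decide (w ≠ ""))).length : Int))).map
      PySem.Int.toStr)
  simp only [hfold]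
  rw [alt_array_eq_pc]
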